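-- pv_equiv track=rewrite | github.com/eerimoq/simba | bin/simbapp.py | pack_c_string
-- ===== SOURCE A (Python) =====
-- def pack_c_string(c_string):
--     string = ''
--
--     in_c_string = False
--     prev_char = None
--
--     for char in c_string:
--         if in_c_string:
--             if prev_char == '\\':
--                 if char == '\\':
--                     prev_char = None
--                 else:
--                     prev_char = char
--                 string += char
--             else:
--                 if prev_char != '\\' and char == '"':
--                     in_c_string = False
--                 else:
--                     string += char
--                 prev_char = char
--         elif char == '"':
--             in_c_string = True
--
--     return '"' + string + '"'
-- ===== SOURCE B (Python) =====
-- def pack_c_string(c_string):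
--     parts = []
--     i = 0
--     n = len(c_string)
--     in_c_string = False
--     while i < n:
--         ch = c_string[i]
--         if not in_c_string:
--             if ch == '"':
--                 in_c_string = True
--             i += 1
--         elif ch == '\\':
--             parts.append(ch)
--             if i + 1 < n:
--                 parts.append(c_string[i + 1])
--                 i += 2
--             else:
--                 i += 1
--         elif ch == '"':
--             in_c_string = False
--             i += 1
--         else:
--             parts.append(ch)
--             i += 1
--     return '"' + ''.join(parts) + '"'
-- ===== Notes on version B (the rewrite author's own statement) =====
-- stated objective: alternative
-- what changed: Replaced the prev_char escape-state fold over characters with an explicit index loop that consumes escape pairs by direct lookahead (skip 2 on backslash), using only an in_c_string flag.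
import Mathlib
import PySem

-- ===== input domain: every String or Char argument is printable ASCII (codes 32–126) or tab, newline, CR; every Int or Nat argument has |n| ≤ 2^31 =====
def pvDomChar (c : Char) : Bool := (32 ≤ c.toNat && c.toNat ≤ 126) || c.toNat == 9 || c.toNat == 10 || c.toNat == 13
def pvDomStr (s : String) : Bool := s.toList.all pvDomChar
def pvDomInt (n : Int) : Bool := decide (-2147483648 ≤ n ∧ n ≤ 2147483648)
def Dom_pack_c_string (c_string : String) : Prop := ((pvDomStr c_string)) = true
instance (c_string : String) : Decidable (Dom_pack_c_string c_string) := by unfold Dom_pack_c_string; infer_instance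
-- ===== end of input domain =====

-- B replaces A's prev_char escape-state tracking with an index loop that skips escape pairs by lookahead (alternative decomposition, same cost).

-- ===== PORT A =====
-- state = (string, in_c_string, prev_char), exactly A's loop body
def packAStep (st : List Char × Bool × Option Char) (c : Char) : List Char × Bool × Option Char :=
  let (s, inc, prev) := st
  if inc then
    if prev = some '\\' then
      (s ++ [c], inc, if c = '\\' then none else some c)
    else
      if prev ≠ some '\\' ∧ c = '"' then (s, false, some c)
      else (s ++ [c], inc, some c)
  else if c = '"' then
    (s, true, prev)
  else
    (s, inc, prev)

def pack_c_string (c_string : String) : String :=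
  let st := c_string.toList.foldl packAStep ([], false, none)
  String.ofList ('"' :: st.1 ++ ['"'])

-- ===== PORT B =====
-- Source B's index loop, as recursion on the remaining characters; the '\\' case consumes two
def packBGo : List Char → Bool → List Char
  | [], _ => []
  | c :: rest, false => if c = '"' then packBGo rest true else packBGo rest false
  | c :: rest, true =>
    if c = '\\' then
      match rest with
      | [] => ['\\']
      | d :: rest' => '\\' :: d :: packBGo rest' true
    else if c = '"' then packBGo rest false
    else c :: packBGo rest true

def pack_c_string_alt (c_string : String) : String :=
  String.ofList ('"' :: packBGo c_string.toList false ++ ['"'])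

-- ===== PRECONDITION & SPEC =====
def Spec_pack_c_string (c_string : String) (out : String) : Prop := out = pack_c_string_alt c_string
instance (c_string : String) (out : String) : Decidable (Spec_pack_c_string c_string out) := by unfold Spec_pack_c_string; infer_instance

-- ===== CLAIM (what is proved, stated in full; the proofs are below) =====
def Claim_equal_pack_c_string : Prop := ∀ (c_string : String), Dom_pack_c_string c_string → Spec_pack_c_string c_string (pack_c_string c_string)

-- ===== LEMMAS AND PROOFS =====

theorem packBGo_nil (b : Bool) : packBGo [] b = [] := by
  conv_lhs => rw [packBGo.eq_def]

theorem packBGo_false (c : Char) (r : List Char) :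
    packBGo (c :: r) false = if c = '"' then packBGo r true else packBGo r false := by
  conv_lhs => rw [packBGo.eq_def]

theorem packBGo_true (c : Char) (r : List Char) :
    packBGo (c :: r) true =
      if c = '\\' then
        match r with
        | [] => ['\\']
        | d :: r' => '\\' :: d :: packBGo r' true
      else if c = '"' then packBGo r false
      else c :: packBGo r true := by
  conv_lhs => rw [packBGo.eq_def]

-- Invariant: at the top of B's loop A's prev_char is never '\\' (A clears or replaces it
-- when it finishes an escape pair, and B consumes the whole pair in one step).
theorem fold_eq (l : List Char) (acc : List Char) (prev : Option Char) (inc : Bool)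
    (h : prev ≠ some '\\') :
    (List.foldl packAStep (acc, inc, prev) l).1 = acc ++ packBGo l inc := by
  match l, inc with
  | [], _ => cases inc <;> simp [packBGo_nil]
  | c :: rest, false =>
    by_cases hc : c = '"'
    · subst hc
      have hstep : packAStep (acc, false, prev) '"' = (acc, true, prev) := by
        simp [packAStep]
      rw [List.foldl_cons, hstep, fold_eq rest acc prev true h]
      simp [packBGo_false]
    · have hstep : packAStep (acc, false, prev) c = (acc, false, prev) := by
        simp [packAStep, hc]
      rw [List.foldl_cons, hstep, fold_eq rest acc prev false h]
      simp [packBGo_false, hc]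
  | c :: rest, true =>
    by_cases hc : c = '\\'
    · subst hc
      match rest with
      | [] =>
        simp [packAStep, h, packBGo_true]
      | d :: rest' =>
        have hstep : packAStep (acc, true, prev) '\\' = (acc ++ ['\\'], true, some '\\') := by
          simp [packAStep, h]
        have hstep2 : packAStep (acc ++ ['\\'], true, some '\\') d
            = (acc ++ ['\\'] ++ [d], true, if d = '\\' then none else some d) := by
          simp [packAStep]
        rw [List.foldl_cons, hstep, List.foldl_cons, hstep2,
          fold_eq rest' (acc ++ ['\\'] ++ [d]) _ true (by split <;> simp_all)]
        simp [packBGo_true]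
    · by_cases hq : c = '"'
      · subst hq
        have hstep : packAStep (acc, true, prev) '"' = (acc, false, some '"') := by
          simp [packAStep, h]
        rw [List.foldl_cons, hstep, fold_eq rest acc (some '"') false (by simp)]
        simp [packBGo_true]
      · have hstep : packAStep (acc, true, prev) c = (acc ++ [c], true, some c) := by
          simp [packAStep, h, hq]
        rw [List.foldl_cons, hstep,
          fold_eq rest (acc ++ [c]) (some c) true (by simp [hc])]
        simp [packBGo_true, hc, hq]
termination_by l.length

-- ===== VERDICT (by name: the statement is the Claim_ definition above) =====
theorem pack_c_string_spec : Claim_equal_pack_c_string := by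
  intro s _
  unfold Spec_pack_c_string pack_c_string pack_c_string_alt
  simp [fold_eq s.toList [] none false (by simp)]
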